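-- pv_equiv track=rewrite | github.com/szhx/Python | University projects/a03/a03q1.py | check_lower
-- ===== SOURCE A (Python) =====
-- def check_lower(s, i):
--     if i == -1:
--         return 0
--     else:
--         if s[i].islower():
--             return 1 + check_lower(s, i-1)
--         else:
--             return check_lower(s, i-1)
-- ===== SOURCE B (Python) =====
-- def check_lower(s, i):
--     count = 0
--     for j in range(i + 1):
--         if s[j].islower():
--             count += 1
--     return count
-- ===== Notes on version B (the rewrite author's own statement) =====
-- stated objective: simpler
-- what changed: Replaced the top-down recursion with an explicit iterative loop accumulating a counter over range(i+1).
import Mathlib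
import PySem

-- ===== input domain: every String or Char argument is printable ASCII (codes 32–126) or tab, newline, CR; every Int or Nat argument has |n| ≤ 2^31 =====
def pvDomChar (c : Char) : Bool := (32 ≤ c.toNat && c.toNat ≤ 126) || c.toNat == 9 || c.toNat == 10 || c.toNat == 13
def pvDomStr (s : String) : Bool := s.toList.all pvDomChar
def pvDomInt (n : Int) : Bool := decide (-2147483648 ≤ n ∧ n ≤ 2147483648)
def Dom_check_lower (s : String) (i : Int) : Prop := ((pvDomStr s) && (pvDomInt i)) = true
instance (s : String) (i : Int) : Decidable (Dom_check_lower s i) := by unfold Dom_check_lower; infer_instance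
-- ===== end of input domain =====

-- B replaces A's recursion by an iterative counting loop over range(i+1) (objective: simpler);
-- equivalence is claimed on the inputs where A returns (−1 ≤ i < len s).

-- ===== PORT A =====
-- literal port of A's recursion; the recursion on i is made total with a fuel counter
-- (fuel = (i + len + 2).toNat always suffices for the paths on which Python A returns);
-- the `none` (IndexError) and fuel-exhaustion branches are outside Pre_check_lower.
def check_lowerFuel (s : String) (fuel : Nat) (i : Int) : Int :=
  match fuel with
  | 0 => 0  -- unreachable on the inputs Pre_check_lower admits
  | f + 1 =>
    if i = -1 then 0
    else
      match PySem.List.pyGet? s.toList i with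
      | none => 0  -- Python raises IndexError here; excluded by Pre_check_lower
      | some c =>
        if PySem.Chars.islower c then 1 + check_lowerFuel s f (i - 1)
        else check_lowerFuel s f (i - 1)

def check_lower (s : String) (i : Int) : Int :=
  check_lowerFuel s ((i + (s.toList.length : Int) + 2).toNat) i

-- ===== PORT B =====
def check_lower_alt (s : String) (i : Int) : Int :=
  (PySem.List.pyRange 0 (i + 1) 1).foldl
    (fun count j =>
      if PySem.Chars.islower (PySem.List.pyGetD s.toList j ' ') then count + 1 else count) 0

-- ===== PRECONDITION & SPEC =====
-- exactly the inputs on which the Python A returns: -1 ≤ i < len(s) (otherwise IndexError)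
def Pre_check_lower (s : String) (i : Int) : Prop := -1 ≤ i ∧ i < (s.toList.length : Int)
instance (s : String) (i : Int) : Decidable (Pre_check_lower s i) := by unfold Pre_check_lower; infer_instance
def pvWitness_check_lower : String × Int := ("aBc", 2)

def Spec_check_lower (s : String) (i : Int) (out : Int) : Prop := out = check_lower_alt s i
instance (s : String) (i : Int) (out : Int) : Decidable (Spec_check_lower s i out) := by unfold Spec_check_lower; infer_instance

-- ===== CLAIM (what is proved, stated in full; the proofs are below) =====
def Claim_equal_check_lower : Prop := ∀ (s : String) (i : Int), Dom_check_lower s i → Pre_check_lower s i → Spec_check_lower s i (check_lower s i)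

-- ===== LEMMAS AND PROOFS =====

-- main induction, stated over a Nat so that i = (n : Int) - 1 runs -1, 0, 1, …
theorem check_lower_eq_alt (s : String) (n : Nat) (hn : (n : Int) ≤ (s.toList.length : Int)) :
    ∀ f : Nat, n < f → check_lowerFuel s f ((n : Int) - 1) = check_lower_alt s ((n : Int) - 1) := by
  induction n with
  | zero =>
    intro f hf
    obtain ⟨g, rfl⟩ : ∃ g, f = g + 1 := ⟨f - 1, by omega⟩
    simp [check_lowerFuel, check_lower_alt, PySem.List.pyRange_one_eq_nil]
  | succ m ih =>
    intro f hf
    obtain ⟨g, rfl⟩ : ∃ g, f = g + 1 := ⟨f - 1, by omega⟩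
    have hm : (m : Int) < (s.toList.length : Int) := by push_cast at hn ⊢; omega
    have hget : PySem.List.pyGet? s.toList ((m : Int)) = some s.toList[m] :=
      PySem.List.pyGet?_ofNat _ _ (by exact_mod_cast hm)
    have hgetD : PySem.List.pyGetD s.toList ((m : Int)) ' ' = s.toList[m] := by
      rw [PySem.List.pyGetD_natCast]
      exact List.getD_eq_getElem _ _ (by exact_mod_cast hm)
    have hrange : PySem.List.pyRange 0 ((m : Int) + 1) 1
        = PySem.List.pyRange 0 (m : Int) 1 ++ [(m : Int)] := by
      exact PySem.List.pyRange_one_succ_right (by omega)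
    have ih' := ih (by push_cast at hn ⊢; omega) g (by omega)
    have hcast : (((m + 1 : Nat)) : Int) - 1 = (m : Int) := by push_cast; ring
    rw [hcast]
    rw [show check_lowerFuel s (g + 1) (m : Int)
        = (if PySem.Chars.islower s.toList[m] then 1 + check_lowerFuel s g ((m : Int) - 1)
           else check_lowerFuel s g ((m : Int) - 1)) by
      rw [check_lowerFuel]
      rw [if_neg (by omega : ¬ ((m : Int) = -1))]
      rw [hget]]
    unfold check_lower_alt
    rw [hrange, List.foldl_append]
    simp only [List.foldl_cons, List.foldl_nil, hgetD]
    unfold check_lower_alt at ih'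
    rw [show (m : Int) - 1 + 1 = (m : Int) from by ring] at ih'
    by_cases hl : PySem.Chars.islower s.toList[m]
    · rw [if_pos hl, if_pos hl]
      omega
    · rw [if_neg (by simp [hl]), if_neg (by simp [hl])]
      exact ih'

-- ===== VERDICT (by name: the statement is the Claim_ definition above) =====
theorem check_lower_spec : Claim_equal_check_lower := by
  intro s i _ hpre
  obtain ⟨h1, h2⟩ := hpre
  have hi : i = ((i + 1).toNat : Int) - 1 := by omega
  unfold Spec_check_lower
  unfold check_lower
  rw [hi]
  exact check_lower_eq_alt s (i + 1).toNat (by omega) _ (by omega)
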